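-- pv_equiv track=rewrite | github.com/RanxiChen/flow | sim/breezecore/tests/branch_test/gen_case.py | pack_memory_map
-- ===== SOURCE A (Python) =====
-- def pack_memory_map(memory_bytes: dict[int, int]) -> dict[str, str]:
--     start_addr = min(memory_bytes)
--     end_addr = max(memory_bytes)
--     aligned_start = start_addr & ~0x7
--     aligned_end = (end_addr + 8) & ~0x7
--
--     memory_map: dict[str, str] = {}
--     for base in range(aligned_start, aligned_end, 8):
--         word = 0
--         for lane in range(8):
--             word |= memory_bytes.get(base + lane, 0) << (lane * 8)
--         memory_map[f"0x{base:x}"] = f"0x{word:016x}"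
--
--     return memory_map
-- ===== SOURCE B (Python) =====
-- def pack_memory_map(memory_bytes: dict[int, int]) -> dict[str, str]:
--     by_word: dict[int, int] = {}
--     for addr, value in memory_bytes.items():
--         w = addr // 8
--         by_word[w] = by_word.get(w, 0) | (value << ((addr % 8) * 8))
--     lo = min(by_word)
--     hi = max(by_word)
--     return {f"0x{w * 8:x}": f"0x{by_word.get(w, 0):016x}" for w in range(lo, hi + 1)}
-- ===== Notes on version B (the rewrite author's own statement) =====
-- stated objective: alternative
-- what changed: B scatters each byte once into a sparse dict keyed by word index addr//8 (OR of value << 8*(addr%8)), then renders a dense range of word indices min..max reading missing words as 0, instead of A's gather loop doing 8 address lookups per aligned word over byte addresses.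
import Mathlib
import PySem

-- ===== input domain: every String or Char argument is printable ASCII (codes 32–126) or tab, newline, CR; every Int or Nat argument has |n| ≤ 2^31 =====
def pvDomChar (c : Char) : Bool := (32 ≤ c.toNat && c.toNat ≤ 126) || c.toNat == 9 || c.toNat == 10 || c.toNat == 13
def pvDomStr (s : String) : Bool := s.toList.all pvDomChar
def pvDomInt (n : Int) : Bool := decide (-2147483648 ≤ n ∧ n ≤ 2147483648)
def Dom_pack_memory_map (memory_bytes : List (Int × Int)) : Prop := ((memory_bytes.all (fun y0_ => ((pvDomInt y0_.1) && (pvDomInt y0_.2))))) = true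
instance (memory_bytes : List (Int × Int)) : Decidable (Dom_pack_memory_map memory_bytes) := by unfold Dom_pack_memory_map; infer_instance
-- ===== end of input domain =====

-- B scatters each input byte once into a sparse dict keyed by word index addr//8 and then renders
-- the dense index range min..max (missing words read as 0), instead of A's per-word gather of 8
-- address lookups; same return value on every input admitted by Pre_.


-- ===== PORT A =====
-- shared formatting helpers: PySem has no hex formatter, so f"{n:x}" / f"{n:016x}" are ported by
-- hand; exact for every Int ('-' sign first, lowercase digits, zero-fill keeps the sign in front).
def pvHexDigit (d : Nat) : Char := if d < 10 then Char.ofNat (48 + d) else Char.ofNat (87 + d)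
def pvHexNat (n : Nat) : List Char := if n = 0 then ['0'] else ((Nat.digits 16 n).map pvHexDigit).reverse
def pvHexChars (x : Int) : List Char := if x < 0 then '-' :: pvHexNat (-x).toNat else pvHexNat x.toNat
-- f"0x{x:x}"
def pvFmtHex (x : Int) : String := String.ofList ('0' :: 'x' :: pvHexChars x)
-- f"0x{x:016x}"  (width 16 includes the sign, exactly Python's zero-padding rule)
def pvFmtHex016 (x : Int) : String := String.ofList ('0' :: 'x' :: PySem.Chars.zfill (pvHexChars x) 16)

-- literal transliteration of A: min/max of the keys, aligned 8-byte range, then for each base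
-- gather the 8 lanes by dict lookup (first match on the association list) and OR them shifted.
-- min()/max() of an empty dict raise ValueError: Pre_ excludes [].
def pack_memory_map (memory_bytes : List (Int × Int)) : List (String × String) :=
  let start_addr := (PySem.List.min? (memory_bytes.map (·.1)) (fun x => x)).getD 0
  let end_addr := (PySem.List.max? (memory_bytes.map (·.1)) (fun x => x)).getD 0
  let aligned_start := PySem.Int.band start_addr (Int.not 7)
  let aligned_end := PySem.Int.band (end_addr + 8) (Int.not 7)
  let memory_map : PySem.Dict String String :=
    (PySem.List.pyRange aligned_start aligned_end 8).foldl (fun d base =>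
      let word := (PySem.List.pyRange 0 8 1).foldl
        (fun w lane => PySem.Int.bor w (((List.lookup (base + lane) memory_bytes).getD 0) <<< ((lane * 8)).toNat)) 0
      d.insert (pvFmtHex base) (pvFmtHex016 word)) PySem.Dict.empty
  memory_map.items

-- ===== PORT B =====
-- literal transliteration of B (Source B): one pass over the items scattering value << 8*(addr % 8)
-- into the accumulator of word index addr // 8 ('by_word[w] = by_word.get(w, 0) | …' is Dict.modify
-- with default 0); then min/max over the accumulator's keys and a rendering pass over the dense
-- index range (missing words read as 0 by get).  The final dict comprehension has pairwise-distinct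
-- keys (hex strings of distinct ints), so its items list is exactly this map in range order.
def pack_memory_map_alt (memory_bytes : List (Int × Int)) : List (String × String) :=
  let by_word : PySem.Dict Int Int :=
    memory_bytes.foldl (fun (d : PySem.Dict Int Int) (p : Int × Int) =>
      d.modify (PySem.Int.floordiv p.1 8) (0 : Int)
        (fun v => PySem.Int.bor v (p.2 <<< ((PySem.Int.mod p.1 8) * 8).toNat)))
      PySem.Dict.empty
  let lo := (PySem.List.min? by_word.keys (fun x => x)).getD 0
  let hi := (PySem.List.max? by_word.keys (fun x => x)).getD 0
  (PySem.List.pyRange lo (hi + 1) 1).map (fun w => (pvFmtHex (w * 8), pvFmtHex016 (by_word.getD w 0)))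

-- ===== PRECONDITION & SPEC =====
-- Pre_ excludes the empty list (min()/max() of an empty dict raise ValueError) and lists with a
-- duplicated address: such a list does not encode a Python dict (dict keys are unique), so the
-- association-list readings of the two programs are not comparable there.
def Pre_pack_memory_map (memory_bytes : List (Int × Int)) : Prop :=
  memory_bytes ≠ [] ∧ (memory_bytes.map (·.1)).Nodup
instance (memory_bytes : List (Int × Int)) : Decidable (Pre_pack_memory_map memory_bytes) := by
  unfold Pre_pack_memory_map; infer_instance
def pvWitness_pack_memory_map : (List (Int × Int)) := [(0, 5), (3, 17)]
def Spec_pack_memory_map (memory_bytes : List (Int × Int)) (out : List (String × String)) : Prop := out = pack_memory_map_alt memory_bytes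
instance (memory_bytes : List (Int × Int)) (out : List (String × String)) : Decidable (Spec_pack_memory_map memory_bytes out) := by unfold Spec_pack_memory_map; infer_instance

-- ===== CLAIM (what is proved, stated in full; the proofs are below) =====
def Claim_equal_pack_memory_map : Prop := ∀ (memory_bytes : List (Int × Int)), Dom_pack_memory_map memory_bytes → Pre_pack_memory_map memory_bytes → Spec_pack_memory_map memory_bytes (pack_memory_map memory_bytes)

-- ===== LEMMAS AND PROOFS =====

-- ---------- bitwise toolkit ----------
theorem pvNot7 : Int.not 7 = -8 := by decide

def pvHexVal (c : Char) : Nat := if 97 ≤ c.toNat then c.toNat - 87 else c.toNat - 48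

-- ---------- the two word computations ----------
def pvW (l : List (Int × Int)) (b acc : Int) : Int :=
  (PySem.List.pyRange 0 8 1).foldl
    (fun w lane => PySem.Int.bor w (((List.lookup (b + lane) l).getD 0) <<< ((lane * 8)).toNat)) acc

def pvContrib (w : Int) (p : Int × Int) : Int :=
  if PySem.Int.floordiv p.1 8 = w then p.2 <<< ((PySem.Int.mod p.1 8) * 8).toNat else 0

theorem pvOrAddOfAndZero : ∀ (a b : Nat), a &&& b = 0 → a ||| b = a + b := by
  intro a
  induction a using Nat.strong_induction_on with
  | _ a ih =>
    intro b h
    rcases Nat.eq_zero_or_pos a with ha | ha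
    · subst ha; simp
    · have h2 : a / 2 &&& b / 2 = 0 := by
        have := (Nat.and_div_two_pow (a := a) (b := b) (n := 1)).symm
        simp only [Nat.pow_one] at this
        rw [this, h]
      have hih := ih (a / 2) (by omega) (b / 2) h2
      have hmod : a % 2 &&& b % 2 = 0 := by
        have := (Nat.and_mod_two_pow (a := a) (b := b) (n := 1)).symm
        simp only [Nat.pow_one] at this
        rw [this, h]
      have hdiv : (a ||| b) / 2 = a / 2 ||| b / 2 := by
        have := Nat.or_div_two_pow (a := a) (b := b) (n := 1)
        simpa using this
      have hm : (a ||| b) % 2 = a % 2 ||| b % 2 := by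
        have := Nat.or_mod_two_pow (a := a) (b := b) (n := 1)
        simpa using this
      have hbit : a % 2 ||| b % 2 = a % 2 + b % 2 := by
        have h1 : a % 2 < 2 := Nat.mod_lt _ (by omega)
        have h2' : b % 2 < 2 := Nat.mod_lt _ (by omega)
        interval_cases h3 : a % 2 <;> interval_cases h4 : b % 2 <;> simp_all
      omega

theorem pvSubAnd (x m : Nat) : x - (x &&& m) = x ^^^ (x &&& m) := by
  set y := x &&& m with hy
  have hdisj : (x ^^^ y) &&& y = 0 := by
    apply Nat.eq_of_testBit_eq
    intro i
    simp [Nat.testBit_and, Nat.testBit_xor, hy]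
    cases x.testBit i <;> cases m.testBit i <;> decide
  have hor : (x ^^^ y) ||| y = x := by
    apply Nat.eq_of_testBit_eq
    intro i
    simp [Nat.testBit_or, Nat.testBit_xor, Nat.testBit_and, hy]
    cases x.testBit i <;> cases m.testBit i <;> decide
  have := pvOrAddOfAndZero _ _ hdisj
  omega

theorem pvIntExt {m n : Int} (h : ∀ i, m.testBit i = n.testBit i) : m = n := by
  cases m with
  | ofNat a =>
    cases n with
    | ofNat b =>
      congr 1
      exact Nat.eq_of_testBit_eq (fun i => by simpa [Int.testBit] using h i)
    | negSucc b =>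
      exfalso
      have hi := h (a + b)
      have ha : a.testBit (a + b) = false :=
        Nat.testBit_lt_two_pow (lt_of_lt_of_le Nat.lt_two_pow_self (Nat.pow_le_pow_right (by omega) (by omega)))
      have hb : b.testBit (a + b) = false :=
        Nat.testBit_lt_two_pow (lt_of_lt_of_le Nat.lt_two_pow_self (Nat.pow_le_pow_right (by omega) (by omega)))
      simp [Int.testBit, ha, hb] at hi
  | negSucc a =>
    cases n with
    | ofNat b =>
      exfalso
      have hi := h (a + b)
      have ha : a.testBit (a + b) = false :=
        Nat.testBit_lt_two_pow (lt_of_lt_of_le Nat.lt_two_pow_self (Nat.pow_le_pow_right (by omega) (by omega)))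
      have hb : b.testBit (a + b) = false :=
        Nat.testBit_lt_two_pow (lt_of_lt_of_le Nat.lt_two_pow_self (Nat.pow_le_pow_right (by omega) (by omega)))
      simp [Int.testBit, ha, hb] at hi
    | negSucc b =>
      congr 1
      apply Nat.eq_of_testBit_eq
      intro i
      have := h i
      simpa [Int.testBit] using this

theorem pvTestBit0 (i : Nat) : (0:Int).testBit i = false := by
  show (Int.ofNat 0).testBit i = false
  simp [Int.testBit]

theorem pvXorAndLdiff (n m : Nat) : n ^^^ (n &&& m) = Nat.ldiff n m := by
  apply Nat.eq_of_testBit_eq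
  intro i
  simp [Nat.testBit_xor, Nat.testBit_and, Nat.testBit_ldiff]
  cases n.testBit i <;> cases m.testBit i <;> decide

theorem pvSubAndLdiff (n m : Nat) : n - (n &&& m) = Nat.ldiff n m := by
  rw [pvSubAnd, pvXorAndLdiff]

theorem pvBorLor (a b : Int) : PySem.Int.bor a b = Int.lor a b := by
  cases a with
  | ofNat m =>
    cases b with
    | ofNat n =>
      show PySem.Int.bor (m:Int) (n:Int) = _
      unfold PySem.Int.bor
      simp [Int.toNat_natCast]
      rfl
    | negSucc n =>
      unfold PySem.Int.bor
      have h0 : ¬ (0:Int) ≤ Int.negSucc n := by simp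
      have h1 : (-(Int.negSucc n) - 1).toNat = n := by simp [Int.negSucc_eq]
      rw [if_pos (show (0:Int) ≤ Int.ofNat m from Int.natCast_nonneg m), if_neg h0, h1]
      rw [pvSubAndLdiff]
      show _ = Int.negSucc (Nat.ldiff n m)
      simp [Int.negSucc_eq]
      omega
  | negSucc m =>
    have h0 : ¬ (0:Int) ≤ Int.negSucc m := by simp
    have h1 : (-(Int.negSucc m) - 1).toNat = m := by simp [Int.negSucc_eq]
    cases b with
    | ofNat n =>
      unfold PySem.Int.bor
      rw [if_neg h0, if_pos (show (0:Int) ≤ Int.ofNat n from Int.natCast_nonneg n), h1]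
      rw [pvSubAndLdiff]
      show _ = Int.negSucc (Nat.ldiff m n)
      simp [Int.negSucc_eq]
      omega
    | negSucc n =>
      unfold PySem.Int.bor
      have h0' : ¬ (0:Int) ≤ Int.negSucc n := by simp
      have h1' : (-(Int.negSucc n) - 1).toNat = n := by simp [Int.negSucc_eq]
      rw [if_neg h0, if_neg h0', h1, h1']
      show _ = Int.negSucc (m &&& n)
      simp [Int.negSucc_eq]
      omega

theorem pvAnd7 (m : Nat) : m &&& 7 = m % 8 := by
  have := Nat.and_two_pow_sub_one_eq_mod m 3
  norm_num at this
  exact this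

theorem pvOr7 (m : Nat) : m ||| 7 = m - m % 8 + 7 := by
  obtain ⟨q, r, hr, rfl⟩ : ∃ q r, r < 8 ∧ m = 8 * q + r := ⟨m / 8, m % 8, by omega, by omega⟩
  have h1 : 8 * q + r = q <<< 3 ||| r := by
    rw [← Nat.shiftLeft_add_eq_or_of_lt (show r < 2 ^ 3 by norm_num; omega)]
    rw [Nat.shiftLeft_eq]; ring_nf
  have h2 : r ||| 7 = 7 := by interval_cases r <;> decide
  have h3 : q <<< 3 ||| 7 = 8 * q + 7 := by
    rw [← Nat.shiftLeft_add_eq_or_of_lt (show (7:Nat) < 2 ^ 3 by norm_num)]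
    rw [Nat.shiftLeft_eq]; ring_nf
  have key : (8 * q + r) ||| 7 = 8 * q + 7 := by rw [h1, Nat.or_assoc, h2, h3]
  rw [key]; omega

theorem pvBandNeg8 (x : Int) : PySem.Int.band x (-8) = x - x % 8 := by
  unfold PySem.Int.band
  by_cases hx : 0 ≤ x
  · rw [if_pos hx, if_neg (by norm_num)]
    have h7 : (-(-8:Int) - 1).toNat = 7 := by decide
    rw [h7, pvAnd7]
    omega
  · rw [if_neg hx, if_neg (by norm_num)]
    have h7 : (-(-8:Int) - 1).toNat = 7 := by decide
    rw [h7, pvOr7 ((-x - 1).toNat)]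
    have := Nat.mod_lt ((-x - 1).toNat) (y := 8) (by omega)
    omega

theorem pvFloordiv8_eq_iff (x w : Int) : PySem.Int.floordiv x 8 = w ↔ 8 * w ≤ x ∧ x < 8 * w + 8 := by
  rw [PySem.Int.floordiv_eq_iff_of_pos (by norm_num)]
  omega

theorem pvMod8 (x : Int) : PySem.Int.mod x 8 = x % 8 :=
  PySem.Int.mod_eq_emod_of_pos (by norm_num)

theorem pvFloordiv8_mono {a b : Int} (h : a ≤ b) :
    PySem.Int.floordiv a 8 ≤ PySem.Int.floordiv b 8 := by
  rw [PySem.Int.floordiv_eq_ediv_of_pos (by norm_num),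
      PySem.Int.floordiv_eq_ediv_of_pos (by norm_num)]
  omega

theorem pvHexVal_digit {d : Nat} (h : d < 16) : pvHexVal (pvHexDigit d) = d := by
  interval_cases d <;> decide

theorem pvUnhexAux (L : List Nat) (hL : ∀ d ∈ L, d < 16) (a : Nat) :
    ((L.map pvHexDigit).reverse).foldl (fun acc c => 16 * acc + pvHexVal c) a
      = a * 16 ^ L.length + Nat.ofDigits 16 L := by
  induction L generalizing a with
  | nil => simp [Nat.ofDigits]
  | cons d ds ih =>
    have hd : d < 16 := hL d (by simp)
    have hds : ∀ x ∈ ds, x < 16 := fun x hx => hL x (by simp [hx])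
    simp only [List.map_cons, List.reverse_cons, List.foldl_append, List.foldl_cons, List.foldl_nil]
    rw [ih hds]
    rw [pvHexVal_digit hd, Nat.ofDigits_cons]
    simp [List.length_cons]
    ring

theorem pvUnhex_hexNat (n : Nat) :
    (pvHexNat n).foldl (fun acc c => 16 * acc + pvHexVal c) 0 = n := by
  unfold pvHexNat
  by_cases h : n = 0
  · subst h; decide
  · rw [if_neg h]
    rw [pvUnhexAux _ (fun d hd => Nat.digits_lt_base (by norm_num) hd) 0]
    simpa using Nat.ofDigits_digits 16 n

theorem pvHexNat_inj : Function.Injective pvHexNat := by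
  intro m n h
  have := congrArg (fun l => l.foldl (fun acc c => 16 * acc + pvHexVal c) 0) h
  simpa [pvUnhex_hexNat] using this

theorem pvNeg_not_mem_hexNat (n : Nat) : '-' ∉ pvHexNat n := by
  unfold pvHexNat
  by_cases h : n = 0
  · subst h; decide
  · rw [if_neg h]
    intro hmem
    rw [List.mem_reverse, List.mem_map] at hmem
    obtain ⟨d, hd, hdd⟩ := hmem
    have : d < 16 := Nat.digits_lt_base (by norm_num) hd
    interval_cases d <;> simp [pvHexDigit] at hdd

theorem pvHexChars_inj : Function.Injective pvHexChars := by
  intro x y h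
  unfold pvHexChars at h
  by_cases hx : x < 0 <;> by_cases hy : y < 0
  · rw [if_pos hx, if_pos hy] at h
    have h2 := pvHexNat_inj (List.cons_injective.eq_iff.mp h)
    omega
  · rw [if_pos hx, if_neg hy] at h
    exfalso
    exact pvNeg_not_mem_hexNat y.toNat (h ▸ List.mem_cons_self)
  · rw [if_neg hx, if_pos hy] at h
    exfalso
    exact pvNeg_not_mem_hexNat x.toNat (h.symm ▸ List.mem_cons_self)
  · rw [if_neg hx, if_neg hy] at h
    have h2 := pvHexNat_inj h
    omega

theorem pvLookup_cons (k a v : Int) (l : List (Int × Int)) :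
    List.lookup k ((a,v)::l) = if k = a then some v else List.lookup k l := by
  by_cases h : k = a
  · simp [List.lookup, h]
  · have hb : (k == a) = false := by simpa using h
    simp [List.lookup, hb, h]

theorem pvRange8 : PySem.List.pyRange 0 8 1 = [0, 1, 2, 3, 4, 5, 6, 7] := by decide

set_option maxHeartbeats 2000000 in
theorem pvW_eq_scatter (l : List (Int × Int)) (w b : Int) (hb : b = 8 * w)
    (hnd : (l.map (·.1)).Nodup) :
    ∀ acc, pvW l b acc = l.foldl (fun a p => PySem.Int.bor a (pvContrib w p)) acc := by
  induction l with
  | nil =>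
    intro acc
    simp [pvW, pvRange8, List.lookup, Int.zero_shiftLeft, PySem.Int.bor_zero]
  | cons p rest ih =>
    intro acc
    obtain ⟨a, v⟩ := p
    have hmap : (a :: rest.map (·.1)).Nodup := by simpa using hnd
    have hnd2 := List.nodup_cons.mp hmap
    simp only [List.foldl_cons]
    rw [← ih hnd2.2 (PySem.Int.bor acc (pvContrib w (a, v)))]
    unfold pvW
    rw [pvRange8]
    simp only [List.foldl_cons, List.foldl_nil, pvLookup_cons]
    by_cases hc : PySem.Int.floordiv a 8 = w
    · have hrange := (pvFloordiv8_eq_iff a w).mp hc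
      obtain ⟨j, hj0, hj8, rfl⟩ : ∃ j:Int, 0 ≤ j ∧ j < 8 ∧ a = b + j :=
        ⟨a - b, by omega, by omega, by omega⟩
      have hnone : List.lookup (b + j) rest = none := by
        rw [List.lookup_eq_none_iff]
        intro q hq
        simp only [bne_iff_ne, ne_eq]
        intro h'
        exact hnd2.1 (h' ▸ List.mem_map_of_mem hq)
      have hcontrib : pvContrib w (b + j, v) = v <<< (j * 8).toNat := by
        unfold pvContrib
        rw [if_pos hc]
        have hm : PySem.Int.mod (b + j) 8 = j := by rw [pvMod8]; omega
        rw [hm]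
      rw [hcontrib]
      have hcond : ∀ i : Int, (b + i = b + j) = ((i = j) : Prop) := by
        intro i; apply propext; omega
      simp only [hcond]
      interval_cases j <;>
        · try simp only [add_zero] at hnone
          norm_num [hnone, Int.zero_shiftLeft, Int.shiftLeft_zero]
          try
            apply pvIntExt
            intro i
            simp only [pvBorLor, Int.testBit_lor, pvTestBit0]
            simp [Bool.or_assoc, Bool.or_comm, Bool.or_left_comm]
    · have hcontrib : pvContrib w (a, v) = 0 := by unfold pvContrib; rw [if_neg hc]
      have hni : ∀ i : Int, 0 ≤ i → i < 8 → ¬ (b + i = a) := by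
        intro i h0 h8 he
        exact hc ((pvFloordiv8_eq_iff a w).mpr (by omega))
      rw [hcontrib, PySem.Int.bor_zero]
      rw [if_neg (by simpa using hni 0 (by norm_num) (by norm_num)),
          if_neg (hni 1 (by norm_num) (by norm_num)),
          if_neg (hni 2 (by norm_num) (by norm_num)),
          if_neg (hni 3 (by norm_num) (by norm_num)),
          if_neg (hni 4 (by norm_num) (by norm_num)),
          if_neg (hni 5 (by norm_num) (by norm_num)),
          if_neg (hni 6 (by norm_num) (by norm_num)),
          if_neg (hni 7 (by norm_num) (by norm_num))]

theorem pvGetD_scatter_fold (l : List (Int × Int)) (d : PySem.Dict Int Int) (w : Int) :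
    (l.foldl (fun d p =>
        d.modify (PySem.Int.floordiv p.1 8) 0
          (fun v => PySem.Int.bor v (p.2 <<< ((PySem.Int.mod p.1 8) * 8).toNat))) d).getD w 0
      = l.foldl (fun a p => PySem.Int.bor a (pvContrib w p)) (d.getD w 0) := by
  induction l generalizing d with
  | nil => simp
  | cons p rest ih =>
    simp only [List.foldl_cons]
    rw [ih]
    congr 1
    rw [PySem.Dict.getD_modify]
    unfold pvContrib
    by_cases hc : PySem.Int.floordiv p.1 8 = w
    · rw [if_pos (by omega), if_pos hc, hc]
    · rw [if_neg (by omega), if_neg hc]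
      simp [PySem.Int.bor_zero]

theorem pvFmtHex_inj : Function.Injective pvFmtHex := by
  intro x y h
  apply pvHexChars_inj
  have := String.ofList_inj.mp h
  simpa using this

theorem pvMain (mb : List (Int × Int)) (hne : mb ≠ [])
    (hnd : (mb.map (·.1)).Nodup) : pack_memory_map mb = pack_memory_map_alt mb := by
  obtain ⟨mn, hmn⟩ : ∃ mn, PySem.List.min? (mb.map (·.1)) (fun x => x) = some mn := by
    rcases h : PySem.List.min? (mb.map (·.1)) (fun x => x) with _ | mn
    · rw [PySem.List.min?_eq_none_iff] at h
      simp only [List.map_eq_nil_iff] at h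
      exact absurd h hne
    · exact ⟨mn, h⟩
  obtain ⟨mx, hmx⟩ : ∃ mx, PySem.List.max? (mb.map (·.1)) (fun x => x) = some mx := by
    rcases h : PySem.List.max? (mb.map (·.1)) (fun x => x) with _ | mx
    · rw [PySem.List.max?_eq_none_iff] at h
      simp only [List.map_eq_nil_iff] at h
      exact absurd h hne
    · exact ⟨mx, h⟩
  have hminle : ∀ y ∈ mb.map (·.1), mn ≤ y := PySem.List.min?_isMin hmn
  have hmaxle : ∀ y ∈ mb.map (·.1), y ≤ mx := PySem.List.max?_isMax hmx
  have hmnmem : mn ∈ mb.map (·.1) := PySem.List.min?_mem hmn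
  have hmxmem : mx ∈ mb.map (·.1) := PySem.List.max?_mem hmx
  -- B's accumulator dict and its keys
  set step := fun (d : PySem.Dict Int Int) (p : Int × Int) =>
    d.modify (PySem.Int.floordiv p.1 8) 0
      (fun v => PySem.Int.bor v (p.2 <<< ((PySem.Int.mod p.1 8) * 8).toNat)) with hstep
  set by_word := mb.foldl step PySem.Dict.empty with hbw
  have hkeys : by_word.keys = PySem.Set.ofList (mb.map (fun p => PySem.Int.floordiv p.1 8)) := by
    rw [hbw, hstep]
    rw [PySem.Dict.keys_foldl_modify_key mb (fun p => PySem.Int.floordiv p.1 8) 0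
      (fun d p => fun v => PySem.Int.bor v (p.2 <<< ((PySem.Int.mod p.1 8) * 8).toNat))
      PySem.Dict.empty]
    rw [PySem.Dict.keys_empty, PySem.Set.update_eq_append_filter, List.nil_append]
    apply List.filter_eq_self.mpr
    intro y hy
    simp [PySem.Set.contains]
  have hkmem : ∀ k, k ∈ by_word.keys ↔ k ∈ mb.map (fun p => PySem.Int.floordiv p.1 8) := by
    intro k; rw [hkeys]; exact PySem.Set.mem_ofList _ _
  -- min and max of the word indices
  have hfmem : PySem.Int.floordiv mn 8 ∈ by_word.keys := by
    rw [hkmem]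
    obtain ⟨p, hp, hp1⟩ := List.mem_map.mp hmnmem
    exact List.mem_map.mpr ⟨p, hp, by rw [hp1]⟩
  have hgmem : PySem.Int.floordiv mx 8 ∈ by_word.keys := by
    rw [hkmem]
    obtain ⟨p, hp, hp1⟩ := List.mem_map.mp hmxmem
    exact List.mem_map.mpr ⟨p, hp, by rw [hp1]⟩
  obtain ⟨lo, hlo⟩ : ∃ lo, PySem.List.min? by_word.keys (fun x => x) = some lo :=
    Option.ne_none_iff_exists'.mp (by
      intro h
      rw [PySem.List.min?_eq_none_iff] at h
      rw [h] at hfmem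
      exact List.not_mem_nil hfmem)
  obtain ⟨hi, hhi⟩ : ∃ hi, PySem.List.max? by_word.keys (fun x => x) = some hi :=
    Option.ne_none_iff_exists'.mp (by
      intro h
      rw [PySem.List.max?_eq_none_iff] at h
      rw [h] at hgmem
      exact List.not_mem_nil hgmem)
  have hloval : lo = PySem.Int.floordiv mn 8 := by
    have h1 : lo ≤ PySem.Int.floordiv mn 8 := PySem.List.min?_isMin hlo _ hfmem
    have h2 : PySem.Int.floordiv mn 8 ≤ lo := by
      have hlomem := PySem.List.min?_mem hlo
      rw [hkmem] at hlomem
      obtain ⟨p, hp, hp1⟩ := List.mem_map.mp hlomem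
      have := hminle _ (List.mem_map_of_mem hp)
      calc PySem.Int.floordiv mn 8 ≤ PySem.Int.floordiv p.1 8 := pvFloordiv8_mono this
        _ = lo := hp1
    omega
  have hhival : hi = PySem.Int.floordiv mx 8 := by
    have h1 : PySem.Int.floordiv mx 8 ≤ hi := PySem.List.max?_isMax hhi _ hgmem
    have h2 : hi ≤ PySem.Int.floordiv mx 8 := by
      have hhimem := PySem.List.max?_mem hhi
      rw [hkmem] at hhimem
      obtain ⟨p, hp, hp1⟩ := List.mem_map.mp hhimem
      have := hmaxle _ (List.mem_map_of_mem hp)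
      calc hi = PySem.Int.floordiv p.1 8 := hp1.symm
        _ ≤ PySem.Int.floordiv mx 8 := pvFloordiv8_mono this
    omega
  have hmnmx : mn ≤ mx := hmaxle mn hmnmem
  have hlohi : lo ≤ hi := by rw [hloval, hhival]; exact pvFloordiv8_mono hmnmx
  -- ediv forms for omega
  have hloe : lo = mn / 8 := by rw [hloval, PySem.Int.floordiv_eq_ediv_of_pos (by norm_num)]
  have hhie : hi = mx / 8 := by rw [hhival, PySem.Int.floordiv_eq_ediv_of_pos (by norm_num)]
  -- A's aligned bounds in terms of lo and hi
  have ha0 : PySem.Int.band mn (Int.not 7) = 8 * lo := by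
    rw [pvNot7, pvBandNeg8, hloe]; omega
  have he0 : PySem.Int.band (mx + 8) (Int.not 7) = 8 * (hi + 1) := by
    rw [pvNot7, pvBandNeg8, hhie]; omega
  -- A's base range is B's index range scaled by 8
  have hbases : PySem.List.pyRange (8 * lo) (8 * (hi + 1)) 8
      = (PySem.List.pyRange lo (hi + 1) 1).map (fun w => w * 8) := by
    rw [PySem.List.pyRange_of_pos _ _ (show (0:Int) < 8 by norm_num),
        PySem.List.pyRange_of_pos _ _ (show (0:Int) < 1 by norm_num), List.map_map]
    have hc1 : (if 8 * lo < 8 * (hi + 1) then ((8 * (hi + 1) - 8 * lo + 8 - 1) / 8).toNat else 0)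
        = (hi + 1 - lo).toNat := by
      rw [if_pos (by omega)]; omega
    have hc2 : (if lo < hi + 1 then ((hi + 1 - lo + 1 - 1) / 1).toNat else 0)
        = (hi + 1 - lo).toNat := by
      rw [if_pos (by omega)]; omega
    rw [hc1, hc2]
    apply List.map_congr_left
    intro k _
    simp only [Function.comp]
    ring
  have hbnd : (PySem.List.pyRange (8 * lo) (8 * (hi + 1)) 8).Nodup := by
    rw [hbases]
    exact List.Nodup.map (fun x y hxy => by omega) (PySem.List.nodup_pyRange_one lo (hi + 1))
  -- A's side: fresh distinct string keys, so items is a map over the bases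
  have hA : ((PySem.List.pyRange (8 * lo) (8 * (hi + 1)) 8).foldl (fun d base =>
        d.insert (pvFmtHex base) (pvFmtHex016 ((PySem.List.pyRange 0 8 1).foldl
          (fun w lane => PySem.Int.bor w (((List.lookup (base + lane) mb).getD 0) <<< ((lane * 8)).toNat)) 0)))
        PySem.Dict.empty).items
      = (PySem.Dict.empty : PySem.Dict String String).items
        ++ (PySem.List.pyRange (8 * lo) (8 * (hi + 1)) 8).map
            (fun b => (pvFmtHex b, pvFmtHex016 (pvW mb b 0))) :=
    PySem.Dict.items_foldl_insert_fresh _ pvFmtHex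
      (fun b => pvFmtHex016 (pvW mb b 0)) PySem.Dict.empty
      (fun a _ => PySem.Dict.contains_empty _) (List.Nodup.map pvFmtHex_inj hbnd)
  have hEmptyItemsS : (PySem.Dict.empty : PySem.Dict String String).items = [] := rfl
  -- each word value: A's gather equals B's accumulator entry
  have hword : ∀ w : Int, pvW mb (8 * w) 0 = by_word.getD w 0 := by
    intro w
    rw [hbw, hstep, pvGetD_scatter_fold, PySem.Dict.getD_empty]
    exact pvW_eq_scatter mb w (8 * w) rfl hnd 0
  -- assemble
  simp only [pack_memory_map, pack_memory_map_alt, hmn, hmx, Option.getD_some, ← hstep, ← hbw,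
    hlo, hhi, ha0, he0]
  rw [hA, hEmptyItemsS, List.nil_append, hbases, List.map_map]
  apply List.map_congr_left
  intro w _
  simp only [Function.comp]
  rw [show w * 8 = 8 * w from by ring, hword w]

-- ===== VERDICT (by name: the statement is the Claim_ definition above) =====
theorem pack_memory_map_spec : Claim_equal_pack_memory_map := by
  intro mb hdom hpre
  unfold Spec_pack_memory_map
  exact pvMain mb hpre.1 hpre.2
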